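-- pv_equiv track=rewrite | github.com/jhdkrwmc/sonix_flasher2 | py.py | kill_header
-- ===== SOURCE A (Python) =====
-- def kill_header(lines):
--     """
--     Throw away the banner & meta block IDA adds on top
--     (everything until the first blank line).
--     """
--     out, skipping = [], True
--     for ln in lines:
--         if skipping and ln.strip() == '':
--             skipping = False
--             continue
--         if not skipping:
--             out.append(ln)
--     return out
-- ===== SOURCE B (Python) =====
-- def kill_header(lines):
--     """Find the first blank line's position, then slice off everything up to it."""
--     lines = list(lines)
--     try:
--         idx = [ln.strip() for ln in lines].index('')
--     except ValueError:
--         return []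
--     return lines[idx + 1:]
-- ===== Notes on version B (the rewrite author's own statement) =====
-- stated objective: alternative
-- what changed: Replaced the single streaming pass with a maintained 'skipping' flag by staged passes: strip every line, locate the first blank with list.index, and return the slice after it (or [] if none).
import Mathlib
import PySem

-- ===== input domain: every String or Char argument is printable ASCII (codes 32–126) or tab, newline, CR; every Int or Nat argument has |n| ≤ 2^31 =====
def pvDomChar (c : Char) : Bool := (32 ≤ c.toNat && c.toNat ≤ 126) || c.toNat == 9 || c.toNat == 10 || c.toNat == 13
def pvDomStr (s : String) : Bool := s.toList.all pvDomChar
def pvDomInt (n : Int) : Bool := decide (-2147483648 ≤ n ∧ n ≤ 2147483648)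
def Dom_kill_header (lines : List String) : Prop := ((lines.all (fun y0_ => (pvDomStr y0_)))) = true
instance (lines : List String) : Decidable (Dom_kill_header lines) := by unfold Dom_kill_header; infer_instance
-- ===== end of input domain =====

-- B replaces A's single streaming pass with a flag by staged passes: strip-map, list.index('') and a slice (alternative; same cost).

-- ===== PORT A =====
-- state = (out, skipping); kill_header_step is the loop body, branches in A's order
def kill_header_step (st : List String × Bool) (ln : String) : List String × Bool :=
  if st.2 && (PySem.Str.strip ln == "") then (st.1, false)
  else if !st.2 then (st.1 ++ [ln], st.2)
  else st

def kill_header (lines : List String) : List String :=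
  (lines.foldl kill_header_step ([], true)).1

-- ===== PORT B =====
-- [ln.strip() for ln in lines].index('')  →  index? on the stripped map; ValueError (none) → []; else lines[idx+1:]
def kill_header_alt (lines : List String) : List String :=
  match PySem.List.index? (lines.map PySem.Str.strip) "" with
  | none => []
  | some idx => PySem.List.slice lines (some ((idx : Int) + 1)) none

-- ===== PRECONDITION & SPEC =====
def Spec_kill_header (lines : List String) (out : List String) : Prop := out = kill_header_alt lines
instance (lines : List String) (out : List String) : Decidable (Spec_kill_header lines out) := by unfold Spec_kill_header; infer_instance

-- ===== CLAIM =====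
def Claim_equal_kill_header : Prop := ∀ (lines : List String), Dom_kill_header lines → Spec_kill_header lines (kill_header lines)

-- ===== LEMMAS AND PROOFS =====
-- once skipping is false, the fold appends every remaining line
theorem kill_header_foldl_false (ls : List String) (out : List String) :
    (ls.foldl kill_header_step (out, false)) = (out ++ ls, false) := by
  induction ls generalizing out with
  | nil => simp
  | cons l ls ih =>
    rw [List.foldl_cons]
    have hstep : kill_header_step (out, false) l = (out ++ [l], false) := rfl
    rw [hstep, ih]
    simp

theorem kill_header_alt_slice (lines : List String) (i : Nat) :
    PySem.List.slice lines (some ((i : Int) + 1)) none = lines.drop (i + 1) := by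
  have : ((i : Int) + 1) = ((i + 1 : Nat) : Int) := by push_cast; ring
  rw [this, PySem.List.slice_from_natCast]

theorem kill_header_eq (lines : List String) : kill_header lines = kill_header_alt lines := by
  induction lines with
  | nil => rfl
  | cons l ls ih =>
    by_cases h : PySem.Str.strip l = ""
    · have hA : kill_header (l :: ls) = ls := by
        unfold kill_header
        rw [List.foldl_cons]
        have hstep : kill_header_step ([], true) l = ([], false) := by
          simp [kill_header_step, h]
        rw [hstep, kill_header_foldl_false]
        simp
      have hidx : PySem.List.index? ((l :: ls).map PySem.Str.strip) "" = some 0 := by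
        rw [List.map_cons, h]
        exact PySem.List.index?_cons_self _ _
      have hB : kill_header_alt (l :: ls) = ls := by
        unfold kill_header_alt
        rw [hidx]
        show PySem.List.slice (l :: ls) (some ((0 : Nat) + 1)) none = ls
        rw [kill_header_alt_slice (l :: ls) 0]
        simp
      rw [hA, hB]
    · have hstep : kill_header_step ([], true) l = ([], true) := by
        simp [kill_header_step, h]
      have hA : kill_header (l :: ls) = kill_header ls := by
        unfold kill_header
        rw [List.foldl_cons, hstep]
      have hidx : PySem.List.index? ((l :: ls).map PySem.Str.strip) ""
          = (PySem.List.index? (ls.map PySem.Str.strip) "").map (· + 1) := by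
        rw [List.map_cons]
        exact PySem.List.index?_cons_of_ne _ h
      have hB : kill_header_alt (l :: ls) = kill_header_alt ls := by
        unfold kill_header_alt
        rw [hidx]
        cases hi : PySem.List.index? (ls.map PySem.Str.strip) "" with
        | none => simp
        | some i =>
          simp only [Option.map_some]
          rw [kill_header_alt_slice (l :: ls) (i + 1), kill_header_alt_slice ls i]
          simp
      rw [hA, hB, ih]

-- ===== VERDICT =====
theorem kill_header_spec : Claim_equal_kill_header := by
  intro lines _
  exact kill_header_eq lines
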